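-- pv_equiv track=rewrite | github.com/Omkar02/FAANG | FindTransitionPoint.py | transitionPoint
-- ===== SOURCE A (Python) =====
-- def transitionPoint(array):
--     idxOne = 0
--     idxTwo = idxOne + 1
--     while idxTwo < len(array):
--         if array[idxOne] != array[idxTwo]:
--             return idxTwo
--         idxOne += 1
--         idxTwo += 1
--     return -1
-- ===== SOURCE B (Python) =====
-- def transitionPoint(array):
--     # Divide and conquer: the first adjacent mismatch in [lo, hi) is either
--     # in the left half, at the split boundary, or in the right half.
--     def rec(lo, hi):
--         if hi - lo <= 1:
--             return -1
--         mid = (lo + hi) // 2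
--         left = rec(lo, mid)
--         if left != -1:
--             return left
--         if array[mid - 1] != array[mid]:
--             return mid
--         return rec(mid, hi)
--     return rec(0, len(array))
-- ===== Notes on version B (the rewrite author's own statement) =====
-- stated objective: alternative
-- what changed: A scans linearly with a sliding pair of indices; B finds the first adjacent mismatch by divide and conquer, recursing into the left half, checking the split boundary, then the right half.
import Mathlib
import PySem

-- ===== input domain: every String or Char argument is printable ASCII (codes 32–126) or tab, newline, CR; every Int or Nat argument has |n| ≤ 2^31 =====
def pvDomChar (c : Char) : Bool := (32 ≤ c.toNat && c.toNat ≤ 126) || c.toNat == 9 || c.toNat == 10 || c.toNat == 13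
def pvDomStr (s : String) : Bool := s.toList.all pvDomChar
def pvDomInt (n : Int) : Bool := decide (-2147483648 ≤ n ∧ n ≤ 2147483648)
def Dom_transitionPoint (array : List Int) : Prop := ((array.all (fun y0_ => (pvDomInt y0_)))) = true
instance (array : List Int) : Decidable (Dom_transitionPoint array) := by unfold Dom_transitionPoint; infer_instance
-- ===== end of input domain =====

-- B replaces A's linear sliding-pair scan by a divide-and-conquer recursion over index
-- intervals; objective: alternative. Return values agree on all inputs.

-- ===== PORT A =====
-- A's while loop; fuel is only a totality guard (fuel = array.length never runs out before
-- the loop's own exit). idxOne < idxTwo < len, so List.getD with default 0 is exact.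
def transitionPointGo (array : List Int) : Nat → Nat → Nat → Int
  | 0, _, _ => -1
  | fuel + 1, idxOne, idxTwo =>
    if idxTwo < array.length then
      if array.getD idxOne 0 ≠ array.getD idxTwo 0 then (idxTwo : Int)
      else transitionPointGo array fuel (idxOne + 1) (idxTwo + 1)
    else -1

def transitionPoint (array : List Int) : Int :=
  transitionPointGo array array.length 0 1

-- ===== PORT B =====
-- Source B's rec(lo, hi); fuel is only a totality guard (each call halves the interval, so
-- fuel = array.length ≥ hi - lo never runs out). 0 < mid < hi ≤ len, so getD is exact.
def tpRec (array : List Int) : Nat → Nat → Nat → Int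
  | 0, _, _ => -1
  | fuel + 1, lo, hi =>
    if hi - lo ≤ 1 then -1
    else
      let mid := (lo + hi) / 2
      let left := tpRec array fuel lo mid
      if left ≠ -1 then left
      else if array.getD (mid - 1) 0 ≠ array.getD mid 0 then (mid : Int)
      else tpRec array fuel mid hi

def transitionPoint_alt (array : List Int) : Int :=
  tpRec array array.length 0 array.length

-- ===== PRECONDITION & SPEC =====
def Spec_transitionPoint (array : List Int) (out : Int) : Prop := out = transitionPoint_alt array
instance (array : List Int) (out : Int) : Decidable (Spec_transitionPoint array out) := by unfold Spec_transitionPoint; infer_instance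

-- ===== CLAIM (what is proved, stated in full; the proofs are below) =====
def Claim_equal_transitionPoint : Prop := ∀ (array : List Int), Dom_transitionPoint array → Spec_transitionPoint array (transitionPoint array)

-- ===== LEMMAS AND PROOFS =====

-- proof-only reference: linear adjacent scan over the interval [lo, hi), fuel-guarded
def linScan (a : List Int) : Nat → Nat → Nat → Int
  | 0, _, _ => -1
  | fuel + 1, lo, hi =>
    if lo + 1 < hi then
      if a.getD lo 0 ≠ a.getD (lo + 1) 0 then ((lo + 1 : Nat) : Int)
      else linScan a fuel (lo + 1) hi
    else -1

-- enough fuel: the result does not depend on the fuel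
theorem linScan_fuel (a : List Int) : ∀ f, ∀ lo hi, hi - lo ≤ f → ∀ g, hi - lo ≤ g →
    linScan a f lo hi = linScan a g lo hi := by
  intro f
  induction f with
  | zero =>
    intro lo hi hf g hg
    cases g with
    | zero => rfl
    | succ g' => rw [linScan, linScan, if_neg (by omega)]
  | succ f' ih =>
    intro lo hi hf g hg
    cases g with
    | zero => rw [linScan, linScan, if_neg (by omega)]
    | succ g' =>
      rw [linScan, linScan]
      by_cases h : lo + 1 < hi
      · rw [if_pos h, if_pos h]
        by_cases hne : a.getD lo 0 ≠ a.getD (lo + 1) 0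
        · rw [if_pos hne, if_pos hne]
        · rw [if_neg hne, if_neg hne]
          exact ih (lo + 1) hi (by omega) g' (by omega)
      · rw [if_neg h, if_neg h]

-- A's scan is linScan with hi = length (same recursion, idxOne = idxTwo - 1)
theorem goA_eq_linScan (a : List Int) : ∀ f i,
    transitionPointGo a f i (i + 1) = linScan a f i a.length := by
  intro f
  induction f with
  | zero => intro i; rfl
  | succ f' ih =>
    intro i
    rw [transitionPointGo, linScan]
    by_cases h : i + 1 < a.length
    · rw [if_pos h, if_pos h]
      by_cases hne : a.getD i 0 ≠ a.getD (i + 1) 0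
      · rw [if_pos hne, if_pos hne]
      · rw [if_neg hne, if_neg hne]; exact ih (i + 1)
    · rw [if_neg h, if_neg h]

-- the linear scan over [lo, hi) splits at any interior point mid
theorem linScan_split (a : List Int) : ∀ k lo mid hi f, mid - lo = k → lo < mid → mid < hi →
    hi - lo ≤ f →
    linScan a f lo hi =
      (if linScan a f lo mid ≠ -1 then linScan a f lo mid
       else if a.getD (mid - 1) 0 ≠ a.getD mid 0 then (mid : Int)
       else linScan a f mid hi) := by
  intro k
  induction k with
  | zero => intro lo mid hi f hk h1 h2 hf; omega
  | succ n ih =>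
    intro lo mid hi f hk h1 h2 hf
    obtain ⟨f', rfl⟩ : ∃ f', f = f' + 1 := ⟨f - 1, by omega⟩
    by_cases hb : lo + 1 = mid
    · have hm : linScan a (f' + 1) lo mid = -1 := by
        rw [linScan, if_neg (by omega)]
      rw [if_neg (by simp [hm]), linScan, if_pos (by omega)]
      subst hb
      simp only [Nat.add_sub_cancel]
      by_cases hne : a.getD lo 0 ≠ a.getD (lo + 1) 0
      · rw [if_pos hne, if_pos hne]
      · rw [if_neg hne, if_neg hne]
        exact linScan_fuel a f' (lo + 1) hi (by omega) (f' + 1) (by omega)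
    · have hlt : lo + 1 < mid := by omega
      rw [linScan, if_pos (by omega)]
      conv_rhs => rw [linScan, if_pos hlt]
      by_cases hne : a.getD lo 0 ≠ a.getD (lo + 1) 0
      · rw [if_pos hne, if_pos hne, if_pos (by simp; omega)]
      · rw [if_neg hne, if_neg hne]
        rw [ih (lo + 1) mid hi f' (by omega) hlt h2 (by omega)]
        rw [linScan_fuel a f' mid hi (by omega) (f' + 1) (by omega)]

-- B's divide and conquer computes the linear scan's answer
theorem tpRec_eq_linScan (a : List Int) : ∀ f lo hi, hi - lo ≤ f → ∀ g, hi - lo ≤ g →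
    tpRec a f lo hi = linScan a g lo hi := by
  intro f
  induction f with
  | zero =>
    intro lo hi hf g hg
    cases g with
    | zero => rfl
    | succ g' => rw [tpRec, linScan, if_neg (by omega)]
  | succ f' ih =>
    intro lo hi hf g hg
    rw [tpRec]
    by_cases h : hi - lo ≤ 1
    · rw [if_pos h]
      cases g with
      | zero => rfl
      | succ g' => rw [linScan, if_neg (by omega)]
    · rw [if_neg h]
      simp only
      have h1 : lo < (lo + hi) / 2 := by omega
      have h2 : (lo + hi) / 2 < hi := by omega
      rw [ih lo ((lo + hi) / 2) (by omega) g (by omega),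
          ih ((lo + hi) / 2) hi (by omega) g (by omega),
          ← linScan_split a ((lo + hi) / 2 - lo) lo ((lo + hi) / 2) hi g rfl h1 h2 hg]

-- ===== VERDICT (by name: the statement is the Claim_ definition above) =====
theorem transitionPoint_spec : Claim_equal_transitionPoint := by
  intro array _
  unfold Spec_transitionPoint transitionPoint transitionPoint_alt
  rw [goA_eq_linScan array array.length 0,
      tpRec_eq_linScan array array.length 0 array.length (by omega) array.length (by omega)]
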